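-- pv_equiv track=rewrite | github.com/RussellLoveCoding/batch-bilingual-book-maker-v2 | book_maker/translator/gpt_free_translator.py | join_lines
-- ===== SOURCE A (Python) =====
-- def join_lines(text):
--     lines = text.splitlines()
--     new_lines = []
--     temp_line = []
--
--     # join
--     for line in lines:
--         if line.strip():
--             temp_line.append(line.strip())
--         else:
--             if temp_line:
--                 new_lines.append(" ".join(temp_line))
--                 temp_line = []
--             new_lines.append(line)
--
--     if temp_line:
--         new_lines.append(" ".join(temp_line))
--
--     text = "\n".join(new_lines)
--
--     # del ^M
--     text = text.replace("^M", "\r")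
--     lines = text.splitlines()
--     filtered_lines = [line for line in lines if line.strip() != "\r"]
--     new_text = "\n".join(filtered_lines)
--
--     return new_text
-- ===== SOURCE B (Python) =====
-- def join_lines(text):
--     lines = text.splitlines()
--     n = len(lines)
--     new_lines = []
--     i = 0
--     while i < n:
--         j = i
--         if lines[i].strip():
--             while j < n and lines[j].strip():
--                 j += 1
--             new_lines.append(" ".join(x.strip() for x in lines[i:j]))
--         else:
--             while j < n and not lines[j].strip():
--                 j += 1
--             new_lines.extend(lines[i:j])
--         i = j
--     text = "\n".join(new_lines).replace("^M", "\r")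
--     return "\n".join(l for l in text.splitlines() if l.strip() != "\r")
-- ===== Notes on version B (the rewrite author's own statement) =====
-- stated objective: alternative
-- what changed: Replaces the temp_line accumulator/flush state machine with a run-based two-pointer scan that locates each maximal run of non-blank or blank lines and emits it directly, with no mutable join buffer.
import Mathlib
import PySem

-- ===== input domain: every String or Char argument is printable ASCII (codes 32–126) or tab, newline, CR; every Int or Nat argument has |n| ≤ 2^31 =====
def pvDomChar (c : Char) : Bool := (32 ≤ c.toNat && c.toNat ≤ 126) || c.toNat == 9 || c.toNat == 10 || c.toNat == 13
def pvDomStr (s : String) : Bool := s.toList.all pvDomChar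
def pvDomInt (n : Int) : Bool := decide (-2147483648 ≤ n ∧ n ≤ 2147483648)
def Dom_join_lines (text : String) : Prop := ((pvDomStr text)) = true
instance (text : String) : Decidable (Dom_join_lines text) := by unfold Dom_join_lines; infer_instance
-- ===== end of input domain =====

-- B replaces A's temp_line accumulator/flush state machine by a run-based scan (alternative decomposition, same cost); return values proved equal on all inputs.

-- ===== PORT A =====
-- the loop body: strip-and-buffer a non-blank line, else flush the buffer and keep the blank line
def joinStep (st : List String × List String) (line : String) : List String × List String :=
  if PySem.Str.strip line ≠ "" then
    (st.1, st.2 ++ [PySem.Str.strip line])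
  else
    ((if st.2 ≠ [] then st.1 ++ [PySem.Str.join " " st.2] else st.1) ++ [line], [])

-- 'if temp_line: new_lines.append(" ".join(temp_line))'
def joinFlush (st : List String × List String) : List String :=
  if st.2 ≠ [] then st.1 ++ [PySem.Str.join " " st.2] else st.1

def join_lines (text : String) : String :=
  let lines := PySem.Str.splitlines text
  let new_lines := joinFlush (lines.foldl joinStep ([], []))
  let text2 := PySem.Str.replace (PySem.Str.join "\n" new_lines) "^M" "\r"
  let filtered_lines := (PySem.Str.splitlines text2).filter (fun line => PySem.Str.strip line ≠ "\r")
  PySem.Str.join "\n" filtered_lines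

-- ===== PORT B =====
def pvKey (l : String) : Bool := PySem.Str.strip l != ""

-- the outer while: consume one maximal non-blank run (joined) or blank run (kept verbatim)
def bGroups : List String → List String
  | [] => []
  | l :: ls =>
    if pvKey l then
      PySem.Str.join " " (PySem.Str.strip l :: (ls.takeWhile pvKey).map PySem.Str.strip)
        :: bGroups (ls.dropWhile pvKey)
    else
      l :: (ls.takeWhile (fun x => !pvKey x) ++ bGroups (ls.dropWhile (fun x => !pvKey x)))
  termination_by lines => lines.length
  decreasing_by
    · exact Nat.lt_succ_of_le (List.length_dropWhile_le ..)
    · exact Nat.lt_succ_of_le (List.length_dropWhile_le ..)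

def join_lines_alt (text : String) : String :=
  let new_lines := bGroups (PySem.Str.splitlines text)
  let text2 := PySem.Str.replace (PySem.Str.join "\n" new_lines) "^M" "\r"
  PySem.Str.join "\n" ((PySem.Str.splitlines text2).filter (fun l => PySem.Str.strip l != "\r"))

-- ===== PRECONDITION & SPEC =====
def Spec_join_lines (text : String) (out : String) : Prop := out = join_lines_alt text
instance (text : String) (out : String) : Decidable (Spec_join_lines text out) := by unfold Spec_join_lines; infer_instance

-- ===== CLAIM (what is proved, stated in full; the proofs are below) =====
def Claim_equal_join_lines : Prop := ∀ (text : String), Dom_join_lines text → Spec_join_lines text (join_lines text)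

-- ===== LEMMAS AND PROOFS =====

-- what A's loop + final flush produce when the buffer holds tl and the output so far is nl
def pvCont (tl nl : List String) : List String → List String
  | [] => joinFlush (nl, tl)
  | l :: ls =>
    if pvKey l then
      nl ++ PySem.Str.join " " (tl ++ ((l :: ls).takeWhile pvKey).map PySem.Str.strip)
        :: bGroups ((l :: ls).dropWhile pvKey)
    else
      joinFlush (nl, tl) ++ bGroups (l :: ls)

theorem flush_foldl_eq_pvCont (lines : List String) :
    ∀ (nl tl : List String), joinFlush (lines.foldl joinStep (nl, tl)) = pvCont tl nl lines := by
  induction lines with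
  | nil => intro nl tl; rfl
  | cons x xs ih =>
    intro nl tl
    by_cases hx : PySem.Str.strip x = ""
    · -- blank line: flush and pass the line through
      have hk : pvKey x = false := by simp [pvKey, hx]
      rw [List.foldl_cons]
      have hstep : joinStep (nl, tl) x
          = ((if tl ≠ [] then nl ++ [PySem.Str.join " " tl] else nl) ++ [x], []) := by
        simp [joinStep, hx]
      rw [hstep, ih]
      cases xs with
      | nil => simp [pvCont, joinFlush, hk, bGroups]
      | cons y ys =>
        by_cases hy : PySem.Str.strip y = ""
        · have hky : pvKey y = false := by simp [pvKey, hy]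
          simp [pvCont, hk, hky, joinFlush, bGroups, List.takeWhile, List.dropWhile]
        · have hky : pvKey y = true := by simp [pvKey, hy]
          simp [pvCont, hk, hky, joinFlush, bGroups, List.takeWhile, List.dropWhile]
    · -- non-blank line: it joins the buffer
      have hk : pvKey x = true := by simp [pvKey, hx]
      rw [List.foldl_cons]
      have hstep : joinStep (nl, tl) x = (nl, tl ++ [PySem.Str.strip x]) := by
        simp [joinStep, hx]
      rw [hstep, ih]
      cases xs with
      | nil => simp [pvCont, joinFlush, hk, bGroups]
      | cons y ys =>
        by_cases hy : PySem.Str.strip y = ""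
        · have hky : pvKey y = false := by simp [pvKey, hy]
          simp [pvCont, hk, hky, joinFlush, List.takeWhile, List.dropWhile]
        · have hky : pvKey y = true := by simp [pvKey, hy]
          simp [pvCont, hk, hky, List.takeWhile, List.dropWhile]

theorem pvCont_nil_nil (lines : List String) : pvCont [] [] lines = bGroups lines := by
  cases lines with
  | nil => simp [pvCont, joinFlush, bGroups]
  | cons l ls =>
    by_cases hl : pvKey l = true
    · simp [pvCont, bGroups, hl, List.takeWhile, List.dropWhile]
    · simp at hl
      simp [pvCont, bGroups, hl, joinFlush]

-- ===== VERDICT (by name: the statement is the Claim_ definition above) =====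
theorem join_lines_spec : Claim_equal_join_lines := by
  intro text _
  unfold Spec_join_lines join_lines join_lines_alt
  simp only
  rw [flush_foldl_eq_pvCont, pvCont_nil_nil]
  have hp : (fun line : String => decide (PySem.Str.strip line ≠ "\r"))
      = (fun l : String => PySem.Str.strip l != "\r") := by
    funext l; by_cases h : PySem.Str.strip l = "\r" <;> simp [h]
  rw [hp]
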